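-- pv_equiv track=rewrite | github.com/MrBrantCode/unitest_baseline | mut_generate/mist_train_taco/taco_12539/solution.py | calculate_pair_sum
-- ===== SOURCE A (Python) =====
-- def calculate_pair_sum(arr, n):
--     cnt = dict()
--     ans = 0
--     pre_sum = 0
--
--     for i in range(n):
--         ans += i * arr[i] - pre_sum
--         pre_sum += arr[i]
--
--         if arr[i] - 1 in cnt:
--             ans -= cnt[arr[i] - 1]
--         if arr[i] + 1 in cnt:
--             ans += cnt[arr[i] + 1]
--
--         if arr[i] not in cnt:
--             cnt[arr[i]] = 0
--         cnt[arr[i]] += 1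
--
--     return ans
-- ===== SOURCE B (Python) =====
-- def calculate_pair_sum(arr, n):
--     ans = 0
--     for i in range(n):
--         for j in range(i):
--             d = arr[i] - arr[j]
--             if abs(d) != 1:
--                 ans += d
--     return ans
-- ===== Notes on version B (the rewrite author's own statement) =====
-- stated objective: simpler
-- what changed: Replaced the incremental prefix-sum + counter-dict pass with the direct double loop that sums arr[i]-arr[j] over all pairs j<i, skipping pairs whose difference is exactly 1 in absolute value.
import Mathlib
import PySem

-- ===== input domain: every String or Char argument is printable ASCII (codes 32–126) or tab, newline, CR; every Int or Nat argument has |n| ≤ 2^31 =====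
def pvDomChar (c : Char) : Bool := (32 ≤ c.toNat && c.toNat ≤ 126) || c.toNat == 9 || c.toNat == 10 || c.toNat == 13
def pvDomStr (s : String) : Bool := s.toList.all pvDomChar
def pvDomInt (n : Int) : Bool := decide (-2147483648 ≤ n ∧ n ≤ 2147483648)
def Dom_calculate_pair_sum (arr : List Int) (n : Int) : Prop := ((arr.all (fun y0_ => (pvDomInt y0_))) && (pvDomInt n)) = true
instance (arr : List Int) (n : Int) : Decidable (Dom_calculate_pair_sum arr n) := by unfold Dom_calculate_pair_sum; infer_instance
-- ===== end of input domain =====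

-- B replaces A's prefix-sum + counter-dict single pass by the direct double loop over pairs (simpler, not faster).

-- ===== PORT A =====
-- A's loop body: state (cnt, ans, pre_sum); literal transliteration of A's statements.
def pvStepA (arr : List Int) (st : PySem.Dict Int Int × Int × Int) (i : Int) : PySem.Dict Int Int × Int × Int :=
  let cnt := st.1
  let ans := st.2.1
  let pre_sum := st.2.2
  let a := PySem.List.pyGetD arr i 0
  let ans := ans + i * a - pre_sum
  let pre_sum := pre_sum + a
  let ans := if cnt.contains (a - 1) then ans - cnt.getD (a - 1) 0 else ans
  let ans := if cnt.contains (a + 1) then ans + cnt.getD (a + 1) 0 else ans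
  let cnt := if cnt.contains a then cnt else cnt.insert a 0
  let cnt := cnt.modify a 0 (· + 1)
  (cnt, ans, pre_sum)

def calculate_pair_sum (arr : List Int) (n : Int) : Int :=
  ((PySem.List.pyRange 0 n 1).foldl (pvStepA arr) (PySem.Dict.empty, 0, 0)).2.1

-- ===== PORT B =====
-- B's loop body: for j in range(i): d = arr[i] - arr[j]; if abs(d) != 1: ans += d
def pvStepB (arr : List Int) (ans : Int) (i : Int) : Int :=
  (PySem.List.pyRange 0 i 1).foldl
    (fun ans j =>
      let d := PySem.List.pyGetD arr i 0 - PySem.List.pyGetD arr j 0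
      if |d| ≠ 1 then ans + d else ans) ans

def calculate_pair_sum_alt (arr : List Int) (n : Int) : Int :=
  (PySem.List.pyRange 0 n 1).foldl (pvStepB arr) 0

-- ===== PRECONDITION & SPEC =====
-- Pre_ excludes exactly the inputs where A raises IndexError (n > len(arr)); B raises there too.
def Pre_calculate_pair_sum (arr : List Int) (n : Int) : Prop := n ≤ (arr.length : Int)
instance (arr : List Int) (n : Int) : Decidable (Pre_calculate_pair_sum arr n) := by
  unfold Pre_calculate_pair_sum; infer_instance
def pvWitness_calculate_pair_sum : List Int × Int := ([3, 1, 2, 7], 4)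

def Spec_calculate_pair_sum (arr : List Int) (n : Int) (out : Int) : Prop := out = calculate_pair_sum_alt arr n
instance (arr : List Int) (n : Int) (out : Int) : Decidable (Spec_calculate_pair_sum arr n out) := by unfold Spec_calculate_pair_sum; infer_instance

-- ===== CLAIM (what is proved, stated in full; the proofs are below) =====
def Claim_equal_calculate_pair_sum : Prop := ∀ (arr : List Int) (n : Int), Dom_calculate_pair_sum arr n → Pre_calculate_pair_sum arr n → Spec_calculate_pair_sum arr n (calculate_pair_sum arr n)

-- ===== LEMMAS AND PROOFS =====

-- B's inner loop over a concrete prefix list, in closed form.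
lemma pvInner_closed (a : Int) (l : List Int) (s : Int) :
    l.foldl (fun ans x => if |a - x| ≠ 1 then ans + (a - x) else ans) s
      = s + (l.length : Int) * a - l.sum - (l.count (a - 1) : Int) + (l.count (a + 1) : Int) := by
  induction l generalizing s with
  | nil => simp
  | cons x l ih =>
    simp only [List.foldl_cons, List.count_cons, List.length_cons, List.sum_cons]
    rcases eq_or_ne x (a - 1) with rfl | h1
    · have hn : ¬ (|a - (a - 1)| ≠ 1) := by simp
      rw [if_neg hn, ih]
      simp only [beq_iff_eq]
      rw [if_neg (show ¬ (a - 1 = a + 1) by omega)]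
      push_cast
      ring
    · rcases eq_or_ne x (a + 1) with rfl | h2
      · have hn : ¬ (|a - (a + 1)| ≠ 1) := by simp [abs_of_nonpos]
        rw [if_neg hn, ih]
        simp only [beq_iff_eq]
        rw [if_neg (show ¬ (a + 1 = a - 1) by omega)]
        push_cast
        ring
      · have hne : |a - x| ≠ 1 := by
          intro h
          rcases abs_eq (by norm_num : (0:Int) ≤ 1) |>.mp h with h | h
          · exact h1 (by omega)
          · exact h2 (by omega)
        rw [if_pos hne, ih]
        simp only [beq_iff_eq]
        rw [if_neg h1, if_neg h2]
        push_cast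
        ring

-- B's step at index m equals the inner fold over the prefix list arr.take m.
lemma pvStepB_prefix (arr : List Int) (m : Nat) (hm : m ≤ arr.length) (s : Int) (a : Int)
    (ha : a = PySem.List.pyGetD arr (m : Int) 0) :
    pvStepB arr s (m : Int)
      = (arr.take m).foldl (fun ans x => if |a - x| ≠ 1 then ans + (a - x) else ans) s := by
  subst ha
  unfold pvStepB
  have hlen : ((arr.take m).length : Int) = (m : Int) := by
    simp [List.length_take, Nat.min_eq_left hm]
  have h1 : (PySem.List.pyRange 0 (m : Int) 1).foldl
        (fun ans j =>
          let d := PySem.List.pyGetD arr (m : Int) 0 - PySem.List.pyGetD arr j 0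
          if |d| ≠ 1 then ans + d else ans) s
      = (PySem.List.pyRange 0 (m : Int) 1).foldl
        (fun ans j =>
          if |PySem.List.pyGetD arr (m : Int) 0 - PySem.List.pyGetD (arr.take m) j 0| ≠ 1
          then ans + (PySem.List.pyGetD arr (m : Int) 0 - PySem.List.pyGetD (arr.take m) j 0)
          else ans) s := by
    apply PySem.List.foldl_congr_mem
    intro acc j hj
    have hj' := (PySem.List.mem_pyRange_one).mp hj
    have h0 : 0 ≤ j := hj'.1
    have hjm : j.toNat < m := by omega
    have : PySem.List.pyGetD (arr.take m) j 0 = PySem.List.pyGetD arr j 0 := by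
      rw [PySem.List.pyGetD_of_nonneg _ _ h0, PySem.List.pyGetD_of_nonneg _ _ h0]
      simp [List.getD, hjm]
    simp only [this]
  rw [h1]
  have h2 := PySem.List.foldl_pyRange_zero_pyGetD (arr.take m) 0
      (fun ans x => if |PySem.List.pyGetD arr (m : Int) 0 - x| ≠ 1
                    then ans + (PySem.List.pyGetD arr (m : Int) 0 - x) else ans) s
  rw [show PySem.List.len (arr.take m) = (m : Int) by simp [PySem.List.len, List.length_take, Nat.min_eq_left hm]] at h2
  exact h2

-- Main invariant: after m iterations A holds a dict counting the prefix, B's running answer, and the prefix sum.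
lemma pvInvariant (arr : List Int) (m : Nat) (hm : m ≤ arr.length) :
    ∃ d : PySem.Dict Int Int,
      (PySem.List.pyRange 0 (m : Int) 1).foldl (pvStepA arr) (PySem.Dict.empty, 0, 0)
        = (d, (PySem.List.pyRange 0 (m : Int) 1).foldl (pvStepB arr) 0, (arr.take m).sum)
      ∧ (∀ x : Int, d.getD x 0 = ((arr.take m).count x : Int))
      ∧ (∀ x : Int, d.contains x = decide (x ∈ arr.take m)) := by
  induction m with
  | zero =>
    refine ⟨PySem.Dict.empty, ?_, ?_, ?_⟩ <;>
      simp
  | succ m ih =>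
    have hm' : m ≤ arr.length := Nat.le_of_succ_le hm
    obtain ⟨d, hd, hget, hcont⟩ := ih hm'
    have hsplit : PySem.List.pyRange 0 ((m + 1 : Nat) : Int) 1
        = PySem.List.pyRange 0 (m : Int) 1 ++ [(m : Int)] := by
      push_cast
      exact PySem.List.pyRange_one_succ_right (by positivity)
    have hmlt : m < arr.length := hm
    have ha : PySem.List.pyGetD arr (m : Int) 0 = arr[m] := by
      rw [PySem.List.pyGetD_of_nonneg _ _ (by positivity)]
      simp [List.getD, List.getElem?_eq_getElem hmlt]
    have htake : arr.take (m + 1) = arr.take m ++ [arr[m]] := List.take_succ_eq_append_getElem hmlt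
    rw [hsplit, List.foldl_append, List.foldl_append, hd, List.foldl_cons, List.foldl_cons,
        List.foldl_nil, List.foldl_nil]
    set ansB := (PySem.List.pyRange 0 (m : Int) 1).foldl (pvStepB arr) 0 with hansB
    have hstepB : pvStepB arr ansB (m : Int)
        = ansB + ((arr.take m).length : Int) * arr[m] - (arr.take m).sum
          - ((arr.take m).count (arr[m] - 1) : Int) + ((arr.take m).count (arr[m] + 1) : Int) := by
      rw [pvStepB_prefix arr m hm' _ _ ha.symm, pvInner_closed]
    have hcnt : ∀ x : Int,
        (if d.contains x then d.getD x 0 else 0) = ((arr.take m).count x : Int) := by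
      intro x
      rw [hcont, hget]
      by_cases hx : x ∈ arr.take m
      · simp [hx]
      · simp [hx, List.count_eq_zero_of_not_mem hx]
    have hsub : ∀ (c : Bool) (x y : Int), (if c then x - y else x) = x - (if c then y else 0) := by
      intro c x y; cases c <;> simp
    have hadd : ∀ (c : Bool) (x y : Int), (if c then x + y else x) = x + (if c then y else 0) := by
      intro c x y; cases c <;> simp
    refine ⟨(if d.contains arr[m] then d else d.insert arr[m] 0).modify arr[m] 0 (· + 1), ?_, ?_, ?_⟩
    · unfold pvStepA
      simp only [ha]
      refine Prod.ext rfl (Prod.ext ?_ ?_)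
    -- answer component
      · show (if d.contains (arr[m] + 1) then
                (if d.contains (arr[m] - 1)
                 then ansB + (m : Int) * arr[m] - (arr.take m).sum - d.getD (arr[m] - 1) 0
                 else ansB + (m : Int) * arr[m] - (arr.take m).sum) + d.getD (arr[m] + 1) 0
              else
                (if d.contains (arr[m] - 1)
                 then ansB + (m : Int) * arr[m] - (arr.take m).sum - d.getD (arr[m] - 1) 0
                 else ansB + (m : Int) * arr[m] - (arr.take m).sum))
            = pvStepB arr ansB (m : Int)
        rw [hadd, hsub, hcnt, hcnt, hstepB,
            show ((arr.take m).length : Int) = (m : Int) by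
              simp [List.length_take, Nat.min_eq_left hm']]
      · show (arr.take m).sum + arr[m] = (arr.take (m + 1)).sum
        rw [htake, List.sum_append, List.sum_cons, List.sum_nil]
        ring
    · intro x
      have hcx : (List.count x (arr.take (m + 1)) : Int)
          = (List.count x (arr.take m) : Int) + (if x = arr[m] then 1 else 0) := by
        rw [htake, List.count_append]
        rcases eq_or_ne x arr[m] with rfl | hx
        · simp
        · simp [hx, (show ¬ (arr[m] = x) from fun h => hx h.symm)]
      by_cases hc : d.contains arr[m] <;>
        simp only [hc, Bool.false_eq_true, if_true, if_false] <;>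
        rw [PySem.Dict.getD_modify]
      · rcases eq_or_ne x arr[m] with rfl | hx
        · rw [if_pos rfl, hget]
          simp at hcx
          omega
        · rw [if_neg hx, hget]
          simp [hx] at hcx
          omega
      · rcases eq_or_ne x arr[m] with rfl | hx
        · rw [if_pos rfl, PySem.Dict.getD_insert_self]
          have hnm : arr[m] ∉ arr.take m := by
            have hcf : d.contains arr[m] = false := by simpa using hc
            have h := hcont arr[m]; rw [hcf] at h
            simpa using h.symm
          have h0 : List.count arr[m] (arr.take m) = 0 := List.count_eq_zero_of_not_mem hnm
          simp at hcx
          omega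
        · rw [if_neg hx, PySem.Dict.getD_insert_of_ne _ _ _ hx, hget]
          simp [hx] at hcx
          omega
    · intro x
      by_cases hc : d.contains arr[m] <;>
        simp only [hc, Bool.false_eq_true, if_true, if_false]
      · rw [PySem.Dict.contains_modify, hcont]
        rcases eq_or_ne x arr[m] with rfl | hx
        · have hmem : arr[m] ∈ arr.take (m + 1) := by
            rw [htake]; exact List.mem_append_right _ (List.mem_singleton_self _)
          simp [hmem]
        · have hiff : x ∈ arr.take (m + 1) ↔ x ∈ arr.take m := by
            rw [htake, List.mem_append, List.mem_singleton]
            exact or_iff_left hx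
          simp [hx, hiff]
      · rw [PySem.Dict.contains_modify, PySem.Dict.contains_insert, hcont]
        rcases eq_or_ne x arr[m] with rfl | hx
        · have hmem : arr[m] ∈ arr.take (m + 1) := by
            rw [htake]; exact List.mem_append_right _ (List.mem_singleton_self _)
          simp [hmem]
        · have hiff : x ∈ arr.take (m + 1) ↔ x ∈ arr.take m := by
            rw [htake, List.mem_append, List.mem_singleton]
            exact or_iff_left hx
          simp [hx, hiff]

-- ===== VERDICT (by name: the statement is the Claim_ definition above) =====
theorem calculate_pair_sum_spec : Claim_equal_calculate_pair_sum := by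
  intro arr n _ hpre
  unfold Spec_calculate_pair_sum calculate_pair_sum calculate_pair_sum_alt
  by_cases hn : n ≤ 0
  · rw [PySem.List.pyRange_one_eq_nil (by omega)]
    simp
  · have hn' : n = ((n.toNat : Nat) : Int) := by omega
    have hlen : n.toNat ≤ arr.length := by
      unfold Pre_calculate_pair_sum at hpre; omega
    obtain ⟨d, hd, -, -⟩ := pvInvariant arr n.toNat hlen
    rw [hn', hd]
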